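-- pv_equiv track=rewrite | github.com/matfizinf/Algorytmy | Algorytmy na tekstach/Palindromy i anagramy/zad4.py | REG
-- ===== SOURCE A (Python) =====
-- def REG(w, n):
--     if n == 1:
--         return 1
--     else:
--         if n % 2 == 0:
--             m = n // 2
--         else:
--             m = (n - 1) // 2
--         for i in range(m):
--             if w[i] != w[n - 1 - i]:
--                 return 0
--         x = w[:m]
--         return 1 + REG(w, m)
-- ===== SOURCE B (Python) =====
-- def REG(w, n):
--     count = 0
--     while n != 1:
--         m = n // 2
--         for i in range(m):
--             if w[i] != w[n - 1 - i]:
--                 return count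
--         count += 1
--         n = m
--     return count + 1
-- ===== Notes on version B (the rewrite author's own statement) =====
-- stated objective: simpler
-- what changed: The non-tail recursion returning 1 + REG(w, n//2) is replaced by an iterative while-loop that maintains a running level counter and halves n in place (returning the counter at the first mismatching level), and the redundant even/odd branch for m (n//2 equals (n-1)//2 for odd n) and the dead slice x = w[:m] are dropped.
import Mathlib
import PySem

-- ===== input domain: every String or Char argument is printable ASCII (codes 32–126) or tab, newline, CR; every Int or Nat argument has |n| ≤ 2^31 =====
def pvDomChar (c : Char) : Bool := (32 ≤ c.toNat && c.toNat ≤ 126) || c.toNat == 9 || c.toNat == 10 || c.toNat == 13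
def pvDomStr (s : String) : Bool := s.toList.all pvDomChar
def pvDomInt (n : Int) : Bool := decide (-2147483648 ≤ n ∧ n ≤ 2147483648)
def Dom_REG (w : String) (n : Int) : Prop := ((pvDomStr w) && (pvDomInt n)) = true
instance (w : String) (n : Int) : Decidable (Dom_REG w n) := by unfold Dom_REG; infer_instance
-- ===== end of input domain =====

-- B replaces A's non-tail recursion (1 + REG(w, n//2)) by an iterative loop with a running
-- level counter, drops the dead slice and the redundant parity branch (objective: simpler).

-- ===== PORT A =====
-- fuel = n.toNat at the top call; within Pre_REG the recursion depth is < n.toNat, so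
-- the fuel guard (returning 0) is never reached — it only makes the recursion total.
def REGauxA (cs : List Char) : Nat → Int → Int
  | 0, _ => 0
  | fuel + 1, n =>
    if n = 1 then 1
    else
      let m : Int := if PySem.Int.mod n 2 = 0 then PySem.Int.floordiv n 2
                     else PySem.Int.floordiv (n - 1) 2
      if (PySem.List.pyRange 0 m 1).any
           (fun i => PySem.List.pyGet? cs i != PySem.List.pyGet? cs (n - 1 - i)) then 0
      else 1 + REGauxA cs fuel m

def REG (w : String) (n : Int) : Int := REGauxA w.toList n.toNat n

-- ===== PORT B =====
-- B's inner 'for i in range(m): if w[i] != w[n-1-i]: return count' as a recursion over the range.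
def REGscanB (cs : List Char) (n : Int) : List Int → Bool
  | [] => false
  | i :: is =>
    if PySem.List.pyGet? cs i != PySem.List.pyGet? cs (n - 1 - i) then true
    else REGscanB cs n is

-- fuel = n.toNat at the top call: within Pre_REG the while-loop runs < n.toNat times,
-- so the fuel guard (returning count) is never reached — it only makes the loop total.
def REGauxB (cs : List Char) : Nat → Int → Int → Int
  | 0, count, _ => count
  | fuel + 1, count, n =>
    if n = 1 then count + 1
    else
      let m : Int := PySem.Int.floordiv n 2
      if REGscanB cs n (PySem.List.pyRange 0 m 1) then count
      else REGauxB cs fuel (count + 1) m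

def REG_alt (w : String) (n : Int) : Int := REGauxB w.toList n.toNat 0 n

-- ===== PRECONDITION & SPEC =====
-- Pre_ excludes exactly the inputs where A raises: n ≤ 0 (infinite recursion, RecursionError)
-- and 2 ≤ n with n > len(w) (IndexError on w[n-1]); A returns on everything Pre_ admits.
def Pre_REG (w : String) (n : Int) : Prop :=
  n = 1 ∨ (2 ≤ n ∧ n ≤ (w.toList.length : Int))
instance (w : String) (n : Int) : Decidable (Pre_REG w n) := by unfold Pre_REG; infer_instance
def pvWitness_REG : String × Int := ("abba", 4)
def Spec_REG (w : String) (n : Int) (out : Int) : Prop := out = REG_alt w n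
instance (w : String) (n : Int) (out : Int) : Decidable (Spec_REG w n out) := by
  unfold Spec_REG; infer_instance

-- ===== CLAIM (what is proved, stated in full; the proofs are below) =====
def Claim_equal_REG : Prop :=
  ∀ (w : String) (n : Int), Dom_REG w n → Pre_REG w n → Spec_REG w n (REG w n)

-- ===== LEMMAS AND PROOFS =====

-- A's parity branch computes n // 2 in both cases.
lemma mA_eq (n : Int) :
    (if PySem.Int.mod n 2 = 0 then PySem.Int.floordiv n 2
     else PySem.Int.floordiv (n - 1) 2) = PySem.Int.floordiv n 2 := by
  rw [PySem.Int.mod_eq_emod_of_pos (by omega),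
      PySem.Int.floordiv_eq_ediv_of_pos (a := n) (by omega),
      PySem.Int.floordiv_eq_ediv_of_pos (a := n - 1) (by omega)]
  split_ifs with h
  · rfl
  · omega

-- B's early-returning scan is A's `any` over the same range.
lemma scanB_eq_any (cs : List Char) (n : Int) (is : List Int) :
    REGscanB cs n is
      = is.any (fun i => PySem.List.pyGet? cs i != PySem.List.pyGet? cs (n - 1 - i)) := by
  induction is with
  | nil => rfl
  | cons i is ih =>
    rw [REGscanB, List.any_cons, ← ih]
    by_cases h : (PySem.List.pyGet? cs i != PySem.List.pyGet? cs (n - 1 - i)) = true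
    · rw [if_pos h, h, Bool.true_or]
    · rw [if_neg h, Bool.eq_false_iff.mpr h, Bool.false_or]

-- Main loop invariant: B's loop with counter `count` computes `count + A's recursion`.
lemma loop_eq (cs : List Char) :
    ∀ (fuel : Nat) (n count : Int), 1 ≤ n → n.toNat ≤ fuel →
      REGauxB cs fuel count n = count + REGauxA cs fuel n := by
  intro fuel
  induction fuel with
  | zero => intro n count h1 h2; omega
  | succ f ih =>
    intro n count h1 h2
    by_cases hn1 : n = 1
    · subst hn1; simp [REGauxA, REGauxB]
    · have hn2 : 2 ≤ n := by omega
      rw [REGauxA, REGauxB, if_neg hn1, if_neg hn1]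
      simp only [mA_eq, scanB_eq_any]
      set m : Int := PySem.Int.floordiv n 2 with hmdef
      have hm2 : m * 2 + PySem.Int.mod n 2 = n := PySem.Int.floordiv_mul_add_mod n 2
      have hmod : PySem.Int.mod n 2 = 0 ∨ PySem.Int.mod n 2 = 1 := by
        rw [PySem.Int.mod_eq_emod_of_pos (by omega)]; omega
      have hm1 : 1 ≤ m := by omega
      rcases Bool.eq_false_or_eq_true ((PySem.List.pyRange 0 m 1).any
          (fun i => PySem.List.pyGet? cs i != PySem.List.pyGet? cs (n - 1 - i))) with h | h
      · rw [h]
        simp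
      · rw [h]
        simp only [Bool.false_eq_true, if_false]
        rw [ih m (count + 1) hm1 (by omega)]
        ring

-- ===== VERDICT (by name: the statement is the Claim_ definition above) =====
theorem REG_spec : Claim_equal_REG := by
  intro w n _ hpre
  unfold Spec_REG REG REG_alt
  have h1 : 1 ≤ n := by rcases hpre with h | ⟨h, _⟩ <;> omega
  rw [loop_eq w.toList n.toNat n 0 h1 le_rfl]
  ring
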